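-- pv_equiv track=rewrite | github.com/Jingik/codetree-TILs | 241010/격자 숫자 놀이/matrix-number-play.py | operation_R
-- ===== SOURCE A (Python) =====
-- from collections import Counter
--
-- def sort_and_count(lst):
--     count = Counter(lst)
--     if 0 in count:
--         del count[0]
--     count = sorted(count.items(), key=lambda x: (x[1], x[0]))
--     result = []
--     for num, freq in count:
--         result.append(num)
--         result.append(freq)
--     return result
--
-- def operation_R(A):
--     max_len = 0
--     new_A = []
--     for row in A:
--         sorted_row = sort_and_count(row)
--         max_len = max(max_len, len(sorted_row))
--         new_A.append(sorted_row)
--     for i in range(len(new_A)):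
--         new_A[i] += [0] * (max_len - len(new_A[i]))
--     return new_A
-- ===== SOURCE B (Python) =====
-- def operation_R(A):
--     rows = []
--     for row in A:
--         s = sorted(row)
--         pairs = []
--         i = 0
--         n = len(s)
--         while i < n:
--             j = i
--             while j < n and s[j] == s[i]:
--                 j += 1
--             if s[i] != 0:
--                 pairs.append((s[i], j - i))
--             i = j
--         pairs.sort(key=lambda p: (p[1], p[0]))
--         rows.append([x for p in pairs for x in p])
--     max_len = max(map(len, rows), default=0)
--     return [r + [0] * (max_len - len(r)) for r in rows]
-- ===== Notes on version B (the rewrite author's own statement) =====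
-- stated objective: alternative
-- what changed: The per-row Counter hash counting is replaced by sorting the row and counting runs with a two-pointer scan over the sorted list (skipping zeros during the scan), and the outer max/pad pass is rebuilt from the produced rows instead of a running accumulator.
import Mathlib
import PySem

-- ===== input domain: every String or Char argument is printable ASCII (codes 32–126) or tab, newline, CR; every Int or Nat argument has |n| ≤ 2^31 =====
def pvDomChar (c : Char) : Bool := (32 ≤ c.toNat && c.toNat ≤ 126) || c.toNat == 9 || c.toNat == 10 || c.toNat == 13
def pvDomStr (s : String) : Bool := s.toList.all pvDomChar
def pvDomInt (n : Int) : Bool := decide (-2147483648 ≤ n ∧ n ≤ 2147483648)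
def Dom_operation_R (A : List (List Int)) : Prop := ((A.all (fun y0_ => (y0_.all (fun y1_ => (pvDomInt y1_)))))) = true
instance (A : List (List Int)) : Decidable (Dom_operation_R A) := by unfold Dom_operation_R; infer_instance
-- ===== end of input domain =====

-- B replaces the Counter-based per-row counting with sort-then-group run counting; same return value, proved equal.
-- Note: Python A mutates new_A's rows in place during padding; the equivalence proved here is about the return value only.

-- ===== PORT A =====
-- helper sort_and_count: Counter, delete key 0, sort items by (freq, value), flatten to [num, freq, ...]
def sortAndCount (lst : List Int) : List Int :=
  let count := PySem.Dict.counter lst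
  let count := if count.contains 0 then count.erase 0 else count
  let sortedPairs := PySem.List.sorted2 count.items (fun x => x.2) (fun x => x.1)
  sortedPairs.foldl (fun result p => (result ++ [p.1]) ++ [p.2]) []

def operation_R (A : List (List Int)) : List (List Int) :=
  -- first loop: max_len accumulator and new_A.append(sorted_row)
  let st := A.foldl (fun (s : Int × List (List Int)) row =>
    let sorted_row := sortAndCount row
    (max s.1 (PySem.List.len sorted_row), s.2 ++ [sorted_row])) (0, [])
  -- second loop: in-place 'new_A[i] += [0] * (max_len - len(new_A[i]))', ported element-wise
  st.2.map (fun r => r ++ PySem.List.pyRepeat [0] (st.1 - PySem.List.len r))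

-- ===== PORT B =====
-- the index-scanning run loop of Source B (i/j two-pointer over the sorted row), ported structurally:
-- the inner 'while j < n and s[j] == s[i]' scan is the takeWhile/dropWhile split at the head element
def pvRuns (s : List Int) : List (Int × Int) :=
  match s with
  | [] => []
  | x :: xs =>
    let t := xs.takeWhile (fun y => y == x)
    let rest := xs.dropWhile (fun y => y == x)
    if x ≠ 0 then (x, PySem.List.len t + 1) :: pvRuns rest else pvRuns rest
termination_by s.length
decreasing_by all_goals simpa [rest] using Nat.lt_succ_of_le (List.length_dropWhile_le _ xs)

def pvRowB (row : List Int) : List Int :=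
  let s := PySem.List.sorted row (fun x => x)
  let pairs := PySem.List.sorted2 (pvRuns s) (fun p => p.2) (fun p => p.1)
  pairs.flatMap (fun p => [p.1, p.2])

def operation_R_alt (A : List (List Int)) : List (List Int) :=
  let rows := A.map pvRowB
  let max_len := PySem.List.maxD (rows.map PySem.List.len) (fun x => x) 0
  rows.map (fun r => r ++ PySem.List.pyRepeat [0] (max_len - PySem.List.len r))

-- ===== PRECONDITION & SPEC =====
def Spec_operation_R (A : List (List Int)) (out : List (List Int)) : Prop := out = operation_R_alt A
instance (A : List (List Int)) (out : List (List Int)) : Decidable (Spec_operation_R A out) := by unfold Spec_operation_R; infer_instance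

-- ===== CLAIM (what is proved, stated in full; the proofs are below) =====
def Claim_equal_operation_R : Prop := ∀ (A : List (List Int)), Dom_operation_R A → Spec_operation_R A (operation_R A)

-- ===== LEMMAS AND PROOFS =====

-- sorted2 with Int keys (k1, k2) is sorted with the lexicographic key
theorem sorted2_eq_sorted_lex {α : Type} (xs : List α) (k1 k2 : α → Int) :
    PySem.List.sorted2 xs k1 k2 = PySem.List.sorted xs (fun a => toLex (k1 a, k2 a)) := by
  rw [PySem.List.sorted_eq_foldl_insertBy]
  show List.foldl _ [] xs = _
  congr 1
  funext acc x
  congr 1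
  funext a b
  have hlex : (toLex (k1 a, k2 a) < toLex (k1 b, k2 b)) ↔ (k1 a < k1 b ∨ k1 a = k1 b ∧ k2 a < k2 b) := by
    simp [Prod.Lex.lt_iff]
  rcases lt_trichotomy (k1 a) (k1 b) with h | h | h
  · simp [hlex, h]
  · simp [h]; simp [Prod.Lex.lt_iff]
  · simp [hlex, h, not_lt_of_gt h]; omega

-- A's pre-sort pair list: the distinct nonzero values of the row with their counts
theorem itemsA_eq (lst : List Int) :
    (if (PySem.Dict.counter lst).contains 0 then (PySem.Dict.counter lst).erase 0
     else PySem.Dict.counter lst).items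
    = ((PySem.Set.ofList lst).filter (fun v => !(v == 0))).map (fun k => (k, (lst.count k : Int))) := by
  by_cases hc : (PySem.Dict.counter lst).contains 0
  · simp only [hc, if_pos, PySem.Dict.erase, PySem.Dict.items_counter, List.filter_map]
    congr 1
  · simp only [hc, if_neg, Bool.false_eq_true, not_false_iff, PySem.Dict.items_counter]
    rw [show ((PySem.Set.ofList lst).filter (fun v => !(v == 0))) = PySem.Set.ofList lst from
      List.filter_eq_self.mpr ?_]
    intro a ha
    have : a ∈ lst := (PySem.Set.mem_ofList lst a).mp ha
    have h0 : (0 : Int) ∉ lst := by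
      intro h
      rw [PySem.Dict.contains_counter] at hc
      simp at hc
      exact hc h
    simp
    rintro rfl; exact h0 this

-- runs of a ≤-sorted list: membership characterisation and distinct keys

theorem pv_dropWhile_head_false {α : Type} (p : α → Bool) (l : List α) (y : α) (d : List α)
    (h : l.dropWhile p = y :: d) : p y = false := by
  induction l with
  | nil => simp at h
  | cons a l ih =>
    by_cases hp : p a
    · rw [List.dropWhile_cons_of_pos hp] at h; exact ih h
    · rw [List.dropWhile_cons_of_neg hp] at h
      cases h
      simpa using hp

theorem drop_lt (x : Int) (xs : List Int) (h : (x :: xs).Pairwise (· ≤ ·)) :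
    ∀ z ∈ xs.dropWhile (fun y => y == x), x < z := by
  intro z hz
  rcases List.pairwise_cons.mp h with ⟨hx, hxs⟩
  have hsub := List.dropWhile_sublist (l := xs) (fun y => y == x)
  cases hd : xs.dropWhile (fun y => y == x) with
  | nil => rw [hd] at hz; cases hz
  | cons y d' =>
    rw [hd] at hz
    rw [hd] at hsub
    have hpd : (y :: d').Pairwise (· ≤ ·) := List.Pairwise.sublist hsub hxs
    have hyxs : y ∈ xs := hsub.subset (List.mem_cons_self)
    have hxy : x ≤ y := hx y hyxs
    have hne : ((y == x) : Bool) = false := pv_dropWhile_head_false _ xs y d' hd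
    have hxy' : x < y := lt_of_le_of_ne hxy (by simp at hne; omega)
    rcases List.mem_cons.mp hz with rfl | hz'
    · exact hxy'
    · exact lt_of_lt_of_le hxy' (List.rel_of_pairwise_cons hpd hz')

theorem runs_spec (s : List Int) (h : s.Pairwise (· ≤ ·)) :
    (∀ v c, ((v, c) ∈ pvRuns s ↔ v ∈ s ∧ v ≠ 0 ∧ c = (s.count v : Int))) ∧
      ((pvRuns s).map Prod.fst).Nodup := by
  revert h
  induction s using pvRuns.induct with
  | case1 => intro _; constructor <;> simp [pvRuns]
  | case2 x xs rest hx0 ih =>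
    intro h
    rcases List.pairwise_cons.mp h with ⟨hxle, hxs⟩
    have hlt := drop_lt x xs h
    have hxnotin : x ∉ xs.dropWhile (fun y => y == x) := fun hm => lt_irrefl x (hlt x hm)
    have hpr : (xs.dropWhile (fun y => y == x)).Pairwise (· ≤ ·) :=
      List.Pairwise.sublist (List.dropWhile_sublist _) hxs
    obtain ⟨ihm, ihn⟩ := ih hpr
    have htake : ∀ y ∈ xs.takeWhile (fun y => y == x), y = x := by
      intro y hy
      have := List.mem_takeWhile_imp hy
      simpa using this
    have hsplit : xs.takeWhile (fun y => y == x) ++ xs.dropWhile (fun y => y == x) = xs :=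
      List.takeWhile_append_dropWhile
    have hct : (xs.takeWhile (fun y => y == x)).count x = (xs.takeWhile (fun y => y == x)).length :=
      List.count_eq_length.mpr (fun b hb => (htake b hb).symm)
    have hcx : (x :: xs).count x = (xs.takeWhile (fun y => y == x)).length + 1 := by
      have h1 : List.count x xs = (xs.takeWhile (fun y => y == x)).length := by
        conv_lhs => rw [← hsplit]
        rw [List.count_append, hct, List.count_eq_zero.mpr hxnotin]
        omega
      rw [List.count_cons_self, h1]
    have hcv : ∀ v, v ≠ x → (x :: xs).count v = (xs.dropWhile (fun y => y == x)).count v := by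
      intro v hv
      have hvt : v ∉ xs.takeWhile (fun y => y == x) := fun hm => hv (htake v hm)
      have h1 : List.count v xs = List.count v (xs.dropWhile (fun y => y == x)) := by
        conv_lhs => rw [← hsplit]
        rw [List.count_append, List.count_eq_zero.mpr hvt]
        omega
      rw [List.count_cons, h1]
      simp
      omega
    have hmem : ∀ v, v ≠ x → (v ∈ x :: xs ↔ v ∈ xs.dropWhile (fun y => y == x)) := by
      intro v hv
      constructor
      · intro hvm
        rcases List.mem_cons.mp hvm with rfl | hvm'
        · exact absurd rfl hv
        · rw [← hsplit] at hvm'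
          rcases List.mem_append.mp hvm' with h1 | h2
          · exact absurd (htake v h1) hv
          · exact h2
      · intro hvm
        exact List.mem_cons_of_mem _ ((List.dropWhile_sublist _).subset hvm)
    have hkeys : ∀ k, k ∈ (pvRuns (xs.dropWhile (fun y => y == x))).map Prod.fst →
        k ∈ xs.dropWhile (fun y => y == x) := by
      intro k hk
      rcases List.mem_map.mp hk with ⟨⟨k', c⟩, hmem', rfl⟩
      exact ((ihm k' c).mp hmem').1
    rw [show pvRuns (x :: xs) = (x, PySem.List.len (xs.takeWhile (fun y => y == x)) + 1) ::
        pvRuns (xs.dropWhile (fun y => y == x)) by rw [pvRuns]; simp [hx0]]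
    constructor
    · intro v c
      by_cases hv : v = x
      · subst hv
        constructor
        · intro hin
          rcases List.mem_cons.mp hin with heq | hin'
          · have hc : c = PySem.List.len (xs.takeWhile (fun y => y == v)) + 1 := by
              simpa using heq
            refine ⟨List.mem_cons_self, hx0, ?_⟩
            rw [hcx, hc]; simp [PySem.List.len]
          · exact absurd ((ihm v c).mp hin').1 hxnotin
        · rintro ⟨_, _, hc⟩
          apply List.mem_cons.mpr; left
          rw [hcx] at hc
          simp [PySem.List.len, hc]
      · constructor
        · intro hin
          rcases List.mem_cons.mp hin with heq | hin'
          · exact absurd (by simpa using congrArg Prod.fst heq) hv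
          · obtain ⟨h1, h2, h3⟩ := (ihm v c).mp hin'
            exact ⟨(hmem v hv).mpr h1, h2, by rw [hcv v hv]; exact h3⟩
        · rintro ⟨h1, h2, h3⟩
          apply List.mem_cons.mpr; right
          exact (ihm v c).mpr ⟨(hmem v hv).mp h1, h2, by rw [← hcv v hv]; exact h3⟩
    · simp only [List.map_cons]
      exact List.nodup_cons.mpr ⟨fun hk => hxnotin (hkeys x hk), ihn⟩
  | case3 x xs rest hx0 ih =>
    intro h
    have hx0' : x = 0 := by omega
    rcases List.pairwise_cons.mp h with ⟨hxle, hxs⟩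
    have hlt := drop_lt x xs h
    have hxnotin : x ∉ xs.dropWhile (fun y => y == x) := fun hm => lt_irrefl x (hlt x hm)
    have hpr : (xs.dropWhile (fun y => y == x)).Pairwise (· ≤ ·) :=
      List.Pairwise.sublist (List.dropWhile_sublist _) hxs
    obtain ⟨ihm, ihn⟩ := ih hpr
    have htake : ∀ y ∈ xs.takeWhile (fun y => y == x), y = x := by
      intro y hy
      have := List.mem_takeWhile_imp hy
      simpa using this
    have hsplit : xs.takeWhile (fun y => y == x) ++ xs.dropWhile (fun y => y == x) = xs :=
      List.takeWhile_append_dropWhile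
    have hcv : ∀ v, v ≠ x → (x :: xs).count v = (xs.dropWhile (fun y => y == x)).count v := by
      intro v hv
      have hvt : v ∉ xs.takeWhile (fun y => y == x) := fun hm => hv (htake v hm)
      have h1 : List.count v xs = List.count v (xs.dropWhile (fun y => y == x)) := by
        conv_lhs => rw [← hsplit]
        rw [List.count_append, List.count_eq_zero.mpr hvt]
        omega
      rw [List.count_cons, h1]
      simp
      omega
    have hmem : ∀ v, v ≠ x → (v ∈ x :: xs ↔ v ∈ xs.dropWhile (fun y => y == x)) := by
      intro v hv
      constructor
      · intro hvm
        rcases List.mem_cons.mp hvm with rfl | hvm'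
        · exact absurd rfl hv
        · rw [← hsplit] at hvm'
          rcases List.mem_append.mp hvm' with h1 | h2
          · exact absurd (htake v h1) hv
          · exact h2
      · intro hvm
        exact List.mem_cons_of_mem _ ((List.dropWhile_sublist _).subset hvm)
    rw [show pvRuns (x :: xs) = pvRuns (xs.dropWhile (fun y => y == x)) by
      rw [pvRuns]; simp [hx0']]
    refine ⟨?_, ihn⟩
    intro v c
    by_cases hv : v = x
    · subst hv
      constructor
      · intro hin
        exact absurd ((ihm v c).mp hin).1 hxnotin
      · rintro ⟨_, h2, _⟩
        exact absurd hx0' h2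
    · constructor
      · intro hin
        obtain ⟨h1, h2, h3⟩ := (ihm v c).mp hin
        exact ⟨(hmem v hv).mpr h1, h2, by rw [hcv v hv]; exact h3⟩
      · rintro ⟨h1, h2, h3⟩
        exact (ihm v c).mpr ⟨(hmem v hv).mp h1, h2, by rw [← hcv v hv]; exact h3⟩

theorem per_row (row : List Int) : sortAndCount row = pvRowB row := by
  have hs : (PySem.List.sorted row (fun x => x)).Pairwise (· ≤ ·) :=
    PySem.List.sorted_pairwise row (fun x => x)
  obtain ⟨hm, hn⟩ := runs_spec _ hs
  have hinj : Function.Injective (fun p : Int × Int => toLex (p.2, p.1)) := by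
    intro a b hab
    have := congrArg ofLex hab
    simp at this
    exact Prod.ext this.2 this.1
  have hperm : (((PySem.Set.ofList row).filter (fun v => !(v == 0))).map
      (fun k => (k, (row.count k : Int)))).Perm (pvRuns (PySem.List.sorted row (fun x => x))) := by
    have hA : (((PySem.Set.ofList row).filter (fun v => !(v == 0))).map
        (fun k => (k, (row.count k : Int)))).Nodup := by
      apply List.Nodup.map
      · intro a b hab; exact congrArg Prod.fst hab
      · exact (PySem.Set.nodup_ofList row).filter _
    have hB : (pvRuns (PySem.List.sorted row (fun x => x))).Nodup := List.Nodup.of_map _ hn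
    refine (List.perm_ext_iff_of_nodup hA hB).mpr ?_
    rintro ⟨v, c⟩
    rw [hm v c]
    have hp := PySem.List.sorted_perm row (fun x => x) false
    rw [hp.mem_iff, hp.count_eq]
    constructor
    · intro hmem'
      rcases List.mem_map.mp hmem' with ⟨k, hk, heq⟩
      rcases List.mem_filter.mp hk with ⟨hk1, hk2⟩
      cases heq
      exact ⟨(PySem.Set.mem_ofList _ _).mp hk1, by simpa using hk2, rfl⟩
    · rintro ⟨h1, h2, rfl⟩
      exact List.mem_map.mpr ⟨v,
        List.mem_filter.mpr ⟨(PySem.Set.mem_ofList _ _).mpr h1, by simpa using h2⟩, rfl⟩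
  have hflat : ∀ (L : List (Int × Int)),
      L.foldl (fun r p => (r ++ [p.1]) ++ [p.2]) [] = L.flatMap (fun p => [p.1, p.2]) := by
    intro L
    rw [PySem.List.foldl_congr_mem L _ (fun acc p => acc ++ [p.1, p.2]) []
      (by intro acc p _; simp)]
    simpa using PySem.List.foldl_append_eq_flatMap (fun p : Int × Int => [p.1, p.2]) L []
  show (PySem.List.sorted2 _ _ _).foldl _ [] = (PySem.List.sorted2 _ _ _).flatMap _
  rw [hflat, itemsA_eq, sorted2_eq_sorted_lex, sorted2_eq_sorted_lex,
    PySem.List.sorted_eq_sorted_of_perm _ _ _ hinj hperm]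

theorem max_fold (ls : List Int) (h : ∀ v ∈ ls, 0 ≤ v) :
    ls.foldl max 0 = PySem.List.maxD ls (fun x => x) 0 := by
  cases ls with
  | nil => rfl
  | cons x t =>
    rw [show PySem.List.maxD (x :: t) (fun x => x) 0 = t.foldl max x by
      simp [PySem.List.maxD, PySem.List.max?_id_cons]]
    rw [show List.foldl max 0 (x :: t) = List.foldl max (max 0 x) t from rfl,
      max_eq_right (h x List.mem_cons_self)]

-- ===== VERDICT (by name: the statement is the Claim_ definition above) =====
theorem operation_R_spec : Claim_equal_operation_R := by
  intro A _
  show operation_R A = operation_R_alt A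
  unfold operation_R operation_R_alt
  rw [PySem.List.foldl_prod_mk (f := fun m row => max m (PySem.List.len (sortAndCount row)))
    (g := fun acc row => acc ++ [sortAndCount row])]
  simp only [PySem.List.foldl_append_singleton_eq_map, List.nil_append, per_row]
  have hmax : A.foldl (fun m row => max m (PySem.List.len (pvRowB row))) 0
      = PySem.List.maxD ((A.map pvRowB).map PySem.List.len) (fun x => x) 0 := by
    rw [← max_fold _ (by
      intro v hv
      simp only [List.mem_map] at hv
      obtain ⟨r, ⟨row, _, rfl⟩, rfl⟩ := hv
      simp [PySem.List.len])]
    rw [List.foldl_map, List.foldl_map]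
  rw [hmax]
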